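-- pv_equiv track=rewrite | github.com/Brx86/Voidaya | plugins/az.py | str_to_az
-- ===== SOURCE A (Python) =====
-- all_map = [["\u200B", "\u200C", "\u200D", "\u202A"], ["l", "|", "I", "1"]]
--
-- az_prefix = ["啊", "这"]
--
-- def str_to_az(str_text, map_type=0):
--     text_map = all_map[map_type]
--     encode_text, hex_text = "", str_text.encode().hex()
--     for hex_num in hex_text:
--         a = int(hex_num, 16) // 4
--         b = int(hex_num, 16) % 4
--         encode_text += text_map[a]
--         encode_text += text_map[b]
--     if map_type == 0:
--         return f"{az_prefix[0]}{encode_text}{az_prefix[1]}"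
--     return encode_text
-- ===== SOURCE B (Python) =====
-- all_map = [["\u200B", "\u200C", "\u200D", "\u202A"], ["l", "|", "I", "1"]]
--
-- az_prefix = ["啊", "这"]
--
-- def str_to_az(str_text, map_type=0):
--     table = all_map[map_type]
--     parts = []
--     for byte in str_text.encode():
--         parts.append(table[byte // 64])
--         parts.append(table[(byte // 16) % 4])
--         parts.append(table[(byte // 4) % 4])
--         parts.append(table[byte % 4])
--     body = "".join(parts)
--     if map_type == 0:
--         return f"{az_prefix[0]}{body}{az_prefix[1]}"
--     return body
-- ===== Notes on version B (the rewrite author's own statement) =====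
-- stated objective: idiomatic
-- what changed: B drops A's hex-string intermediate (and the per-digit int(h,16) re-parsing) and iterates directly over the encoded bytes, emitting the four base-4 digits of each byte via table lookups collected into a list and joined once, instead of A's two-chars-per-hex-digit string concatenation loop.
import Mathlib
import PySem

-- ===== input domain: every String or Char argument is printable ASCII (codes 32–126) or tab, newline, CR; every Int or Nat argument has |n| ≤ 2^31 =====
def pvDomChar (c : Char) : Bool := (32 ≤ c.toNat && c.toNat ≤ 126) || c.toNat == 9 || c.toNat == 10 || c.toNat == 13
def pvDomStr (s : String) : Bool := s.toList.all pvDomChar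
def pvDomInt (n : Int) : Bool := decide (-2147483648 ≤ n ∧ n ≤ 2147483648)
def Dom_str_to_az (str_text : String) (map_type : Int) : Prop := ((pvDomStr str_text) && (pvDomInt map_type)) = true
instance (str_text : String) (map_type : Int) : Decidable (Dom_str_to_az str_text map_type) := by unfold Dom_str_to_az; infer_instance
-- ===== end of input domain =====

-- B drops the hex-string intermediate of A and maps each byte directly to its four
-- base-4 digits (one pass over bytes, four table cells per byte, joined at the end);
-- objective: simpler/idiomatic decomposition, same linear cost.

def pvAllMap : List (List String) :=
  [["\u200B", "\u200C", "\u200D", "\u202A"], ["l", "|", "I", "1"]]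

def pvAzPrefix : List String := ["啊", "这"]

-- ===== PORT A =====
-- port of str_text.encode().hex(): two lowercase hex digits per byte (Dom keeps chars ASCII,
-- so each char is one byte whose value is its code point; exact there)
def pvHexChar (d : Nat) : Char :=
  if d < 10 then Char.ofNat (48 + d) else Char.ofNat (87 + d)

def pvHexOfStr (cs : List Char) : List Char :=
  cs.flatMap (fun c => [pvHexChar (c.toNat / 16), pvHexChar (c.toNat % 16)])

-- port of int(hex_num, 16) on the lowercase hex digits produced above (exact on those)
def pvHexVal (c : Char) : Nat :=
  if 97 ≤ c.toNat then c.toNat - 87 else c.toNat - 48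

-- A's for-loop over hex_text, accumulating encode_text
def pvAzLoopA (tm : List String) (hx : List Char) (acc : String) : String :=
  match hx with
  | [] => acc
  | h :: t =>
      pvAzLoopA tm t
        (acc ++ (PySem.List.pyGet? tm (Int.ofNat (pvHexVal h / 4))).getD ""
             ++ (PySem.List.pyGet? tm (Int.ofNat (pvHexVal h % 4))).getD "")

def str_to_az (str_text : String) (map_type : Int) : String :=
  match PySem.List.pyGet? pvAllMap map_type with
  | none => ""   -- IndexError in Python; excluded by Pre_str_to_az
  | some text_map =>
      let encode_text := pvAzLoopA text_map (pvHexOfStr str_text.toList) ""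
      if map_type = 0 then (pvAzPrefix.getD 0 "") ++ encode_text ++ (pvAzPrefix.getD 1 "")
      else encode_text

-- ===== PORT B =====
-- the four base-4 digits of one byte, high to low, looked up in the table
def pvByteQuad (table : List String) (n : Nat) : List String :=
  [(PySem.List.pyGet? table (Int.ofNat (n / 64))).getD "",
   (PySem.List.pyGet? table (Int.ofNat (n / 16 % 4))).getD "",
   (PySem.List.pyGet? table (Int.ofNat (n / 4 % 4))).getD "",
   (PySem.List.pyGet? table (Int.ofNat (n % 4))).getD ""]

def str_to_az_alt (str_text : String) (map_type : Int) : String :=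
  match PySem.List.pyGet? pvAllMap map_type with
  | none => ""   -- IndexError in Python; excluded by Pre_str_to_az
  | some table =>
      let body := String.join (str_text.toList.flatMap (fun c => pvByteQuad table c.toNat))
      if map_type = 0 then (pvAzPrefix.getD 0 "") ++ body ++ (pvAzPrefix.getD 1 "")
      else body

-- ===== PRECONDITION & SPEC =====
-- Pre_ excludes exactly the map_type values on which all_map[map_type] raises IndexError
-- in both A and B (all_map has length 2, so Python accepts -2..1).
def Pre_str_to_az (str_text : String) (map_type : Int) : Prop :=
  map_type = 0 ∨ map_type = 1 ∨ map_type = -1 ∨ map_type = -2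
instance (str_text : String) (map_type : Int) : Decidable (Pre_str_to_az str_text map_type) := by
  unfold Pre_str_to_az; infer_instance

def pvWitness_str_to_az : String × Int := ("az!", 0)

def Spec_str_to_az (str_text : String) (map_type : Int) (out : String) : Prop := out = str_to_az_alt str_text map_type
instance (str_text : String) (map_type : Int) (out : String) : Decidable (Spec_str_to_az str_text map_type out) := by unfold Spec_str_to_az; infer_instance

-- ===== CLAIM (what is proved, stated in full; the proofs are below) =====
def Claim_equal_str_to_az : Prop := ∀ (str_text : String) (map_type : Int), Dom_str_to_az str_text map_type → Pre_str_to_az str_text map_type → Spec_str_to_az str_text map_type (str_to_az str_text map_type)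

-- ===== LEMMAS AND PROOFS =====

theorem pvAzLoopA_acc (tm : List String) (hx : List Char) (acc : String) :
    pvAzLoopA tm hx acc = acc ++ pvAzLoopA tm hx "" := by
  induction hx generalizing acc with
  | nil => simp [pvAzLoopA]
  | cons h t ih =>
      rw [pvAzLoopA, pvAzLoopA]
      conv_lhs => rw [ih]
      conv_rhs => rw [ih]
      simp [String.append_assoc]

theorem pvFoldlAppend (x : String) (l : List String) :
    List.foldl (fun r s => r ++ s) x l = x ++ List.foldl (fun r s => r ++ s) "" l := by
  induction l generalizing x with
  | nil => simp
  | cons a t ih =>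
      rw [List.foldl_cons, List.foldl_cons, ih, ih ("" ++ a)]
      simp [String.append_assoc]

theorem pvHexVal_pvHexChar (d : Nat) (hd : d < 16) :
    pvHexVal (pvHexChar d) = d := by
  interval_cases d <;> decide

-- the two hex nibbles of a byte, split //4 / %4 each, are exactly the four base-4 digits
theorem pvAzLoopA_eq_quads (tm : List String) (cs : List Char)
    (hcs : ∀ c ∈ cs, c.toNat ≤ 126) :
    pvAzLoopA tm (pvHexOfStr cs) "" =
      String.join (cs.flatMap (fun c => pvByteQuad tm c.toNat)) := by
  induction cs with
  | nil => simp [pvHexOfStr, pvAzLoopA, String.join]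
  | cons c t ih =>
      have hc : c.toNat ≤ 126 := hcs c (List.mem_cons_self ..)
      have h1 : c.toNat / 16 < 16 := by omega
      have h2 : c.toNat % 16 < 16 := by omega
      have e1 := pvHexVal_pvHexChar _ h1
      have e2 := pvHexVal_pvHexChar _ h2
      rw [show pvHexOfStr (c :: t)
            = pvHexChar (c.toNat / 16) :: pvHexChar (c.toNat % 16) :: pvHexOfStr t from by
          simp [pvHexOfStr]]
      rw [pvAzLoopA, pvAzLoopA, pvAzLoopA_acc]
      rw [ih (fun x hx => hcs x (List.mem_cons_of_mem _ hx))]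
      rw [e1, e2]
      have d1 : c.toNat / 16 / 4 = c.toNat / 64 := by omega
      have d2 : c.toNat / 16 % 4 = c.toNat / 16 % 4 := rfl
      have d3 : c.toNat % 16 / 4 = c.toNat / 4 % 4 := by omega
      have d4 : c.toNat % 16 % 4 = c.toNat % 4 := by omega
      rw [d1, d3, d4]
      simp only [pvByteQuad, List.flatMap_cons, String.join]
      rw [List.foldl_append]
      simp only [List.foldl_cons, List.foldl_nil]
      rw [pvFoldlAppend (_ ++ _)]

-- ===== VERDICT (by name: the statement is the Claim_ definition above) =====
theorem str_to_az_spec : Claim_equal_str_to_az := by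
  intro s mt hdom hpre
  unfold Spec_str_to_az str_to_az str_to_az_alt
  unfold Dom_str_to_az at hdom
  have hchars : ∀ c ∈ s.toList, c.toNat ≤ 126 := by
    intro c hc
    have : s.toList.all pvDomChar = true := by
      have := Bool.and_elim_left hdom
      simpa [pvDomStr] using this
    have hc' := List.all_eq_true.mp this c hc
    simp [pvDomChar] at hc'
    omega
  rcases hpre with h | h | h | h <;> subst h <;>
    simp [pvAzLoopA_eq_quads _ _ hchars, PySem.List.pyGet?]
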